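-- pv_equiv track=rewrite | github.com/StarfBerry/poke-scripts | RNG/Euclid.py | lcrng_recover_lower_16bits_pid_2
-- ===== SOURCE A (Python) =====
-- from math import ceil
--
-- LCRNGR_MUL_2   = 0xDC6C95D9        # 0xEEB9EB65^2 & 0xFFFFFFFF
--
-- LCRNGR_SUB_2   = 0x4D3BB127        # (0xA3561A1^2 - 0xFFFF) & 0xFFFFFFFF
--
-- LCRNGR_BASE_2  = 0xDC6BB96D6A26    # (LCRNGR_MUL_2 + 1) * 0xFFFF
--
-- LCRNGR_PRIME_2 = 0x1F
--
-- LCRNGR_RMAX_2  = 0x1F0000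
--
-- LCRNGR_SKIP1_2 = 0xBAED7C
--
-- def lcrng_recover_lower_16bits_pid_2(pid):
--     first = pid & 0xffff0000
--     second = (pid & 0xffff) << 16
--
--     k = 0
--     t = (second - LCRNGR_MUL_2 * first - LCRNGR_SUB_2) & 0xffffffff
--     x = (t * LCRNGR_PRIME_2) % LCRNGR_MUL_2
--     kmax = (LCRNGR_BASE_2 - t) >> 32
--
--     res = []
--     while k <= kmax: # at most 188 iterations
--         r = (x + LCRNGR_SKIP1_2 * k) % LCRNGR_MUL_2
--         if r % LCRNGR_PRIME_2 == 0 and r < LCRNGR_RMAX_2: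
--             tmp = t + k * 0x100000000
--             low = ((tmp // LCRNGR_MUL_2) * 0x95D9 + 0xB126) & 0xffff # backward of 2 states to get the correct 16bits low for LCRNG
--             res.append(second | low)
--
--         k += ceil((LCRNGR_MUL_2 - r) / LCRNGR_SKIP1_2)
--
--     return res
-- ===== SOURCE B (Python) =====
-- LCRNGR_MUL_2   = 0xDC6C95D9
-- LCRNGR_SUB_2   = 0x4D3BB127
-- LCRNGR_BASE_2  = 0xDC6BB96D6A26
-- LCRNGR_PRIME_2 = 0x1F
-- LCRNGR_RMAX_2  = 0x1F0000
-- LCRNGR_SKIP1_2 = 0xBAED7C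
--
-- def lcrng_recover_lower_16bits_pid_2(pid):
--     first = pid & 0xffff0000
--     second = (pid & 0xffff) << 16
--
--     t = (second - LCRNGR_MUL_2 * first - LCRNGR_SUB_2) & 0xffffffff
--     x = (t * LCRNGR_PRIME_2) % LCRNGR_MUL_2
--     kmax = (LCRNGR_BASE_2 - t) >> 32
--
--     res = []
--     for k in range(kmax + 1):
--         r = (x + LCRNGR_SKIP1_2 * k) % LCRNGR_MUL_2
--         if r % LCRNGR_PRIME_2 == 0 and r < LCRNGR_RMAX_2:
--             tmp = t + k * 0x100000000
--             low = ((tmp // LCRNGR_MUL_2) * 0x95D9 + 0xB126) & 0xffff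
--             res.append(second | low)
--     return res
-- ===== Notes on version B (the rewrite author's own statement) =====
-- stated objective: simpler
-- what changed: A's analytic skip-stepping while-loop (k += ceil((MUL-r)/SKIP1), jumping straight to the next wrap-around) is replaced by a plain exhaustive for-k-in-range(kmax+1) scan testing every k; since SKIP1 > RMAX the skipped k's can never satisfy r < RMAX, so the same candidates appear in the same order.
import Mathlib
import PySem

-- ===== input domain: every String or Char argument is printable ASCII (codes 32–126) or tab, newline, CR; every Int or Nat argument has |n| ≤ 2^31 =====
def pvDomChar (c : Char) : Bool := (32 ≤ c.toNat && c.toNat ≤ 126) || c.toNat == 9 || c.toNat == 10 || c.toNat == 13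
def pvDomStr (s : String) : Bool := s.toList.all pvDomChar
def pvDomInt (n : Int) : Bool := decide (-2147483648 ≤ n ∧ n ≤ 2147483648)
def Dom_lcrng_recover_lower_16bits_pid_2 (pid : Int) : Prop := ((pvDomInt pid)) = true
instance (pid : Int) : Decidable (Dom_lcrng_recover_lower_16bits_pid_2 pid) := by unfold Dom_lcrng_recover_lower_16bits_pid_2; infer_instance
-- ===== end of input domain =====

-- B replaces A's analytic skip-stepping while-loop (k += ceil((MUL-r)/SKIP1)) by a plain
-- exhaustive scan of every k in range(kmax+1); same candidates in the same order (objective: simpler).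

-- ===== PORT A =====
-- Constants from the Python module (as numerals): LCRNGR_MUL_2 = 3698103769, LCRNGR_SUB_2 = 1295757607,
-- LCRNGR_BASE_2 = 242355230566950, LCRNGR_PRIME_2 = 31, LCRNGR_RMAX_2 = 2031616, LCRNGR_SKIP1_2 = 12250492.
-- The while-loop of A, with `res` the accumulator and `fuel` a totality guard (each step increases k
-- by at least 1, so fuel = kmax+1-k iterations always suffice; A's loop always terminates).
-- Python's `ceil((LCRNGR_MUL_2 - r) / LCRNGR_SKIP1_2)` (float division, then ceil) is ported as the
-- exact integer ceiling (3698103769 - r + 12250491) / 12250492: with 0 ≤ r < 3698103769 the true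
-- quotient is below 303, so the double rounding error (< 303·2⁻⁵²) is far smaller than the distance
-- 1/12250492 of any non-integer quotient to an integer, and ceil of the rounded double equals the
-- exact integer ceiling.
def pvLoopA (t second x kmax : Int) (k : Int) (res : List Int) : Nat → List Int
  | 0 => res
  | fuel + 1 =>
    if k ≤ kmax then
      let r := PySem.Int.mod (x + 12250492 * k) 3698103769
      let res' := if PySem.Int.mod r 31 = 0 ∧ r < 2031616 then
          res ++ [PySem.Int.bor second (PySem.Int.band
            (PySem.Int.floordiv (t + k * 4294967296) 3698103769 * 38361 + 45350) 65535)]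
        else res
      pvLoopA t second x kmax (k + (3698103769 - r + 12250491) / 12250492) res' fuel
    else res

def lcrng_recover_lower_16bits_pid_2 (pid : Int) : List Int :=
  let first := PySem.Int.band pid 0xffff0000
  let second := (PySem.Int.band pid 0xffff) <<< (16 : Nat)
  let t := PySem.Int.band (second - 3698103769 * first - 1295757607) 0xffffffff
  let x := PySem.Int.mod (t * 31) 3698103769
  let kmax := (242355230566950 - t) >>> (32 : Nat)
  pvLoopA t second x kmax 0 [] (kmax + 1).toNat

-- ===== PORT B =====
def lcrng_recover_lower_16bits_pid_2_alt (pid : Int) : List Int :=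
  let first := PySem.Int.band pid 0xffff0000
  let second := (PySem.Int.band pid 0xffff) <<< (16 : Nat)
  let t := PySem.Int.band (second - 3698103769 * first - 1295757607) 0xffffffff
  let x := PySem.Int.mod (t * 31) 3698103769
  let kmax := (242355230566950 - t) >>> (32 : Nat)
  (PySem.List.pyRange 0 (kmax + 1) 1).foldl (fun res k =>
    let r := PySem.Int.mod (x + 12250492 * k) 3698103769
    if PySem.Int.mod r 31 = 0 ∧ r < 2031616 then
      res ++ [PySem.Int.bor second (PySem.Int.band
        (PySem.Int.floordiv (t + k * 4294967296) 3698103769 * 38361 + 45350) 65535)]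
    else res) []

-- ===== PRECONDITION & SPEC =====
def Spec_lcrng_recover_lower_16bits_pid_2 (pid : Int) (out : List Int) : Prop := out = lcrng_recover_lower_16bits_pid_2_alt pid
instance (pid : Int) (out : List Int) : Decidable (Spec_lcrng_recover_lower_16bits_pid_2 pid out) := by unfold Spec_lcrng_recover_lower_16bits_pid_2; infer_instance

-- ===== CLAIM (what is proved, stated in full; the proofs are below) =====
def Claim_equal_lcrng_recover_lower_16bits_pid_2 : Prop := ∀ (pid : Int), Dom_lcrng_recover_lower_16bits_pid_2 pid → Spec_lcrng_recover_lower_16bits_pid_2 pid (lcrng_recover_lower_16bits_pid_2 pid)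

-- ===== LEMMAS AND PROOFS =====

-- the contribution of iteration k (empty when the test fails)
def pvG (t second x : Int) (k : Int) : List Int :=
  let r := PySem.Int.mod (x + 12250492 * k) 3698103769
  if PySem.Int.mod r 31 = 0 ∧ r < 2031616 then
    [PySem.Int.bor second (PySem.Int.band
      (PySem.Int.floordiv (t + k * 4294967296) 3698103769 * 38361 + 45350) 65535)]
  else []

lemma pvModM (a : Int) : PySem.Int.mod a 3698103769 = a % 3698103769 :=
  PySem.Int.mod_eq_emod_of_pos (by norm_num)

lemma pvMod31 (a : Int) : PySem.Int.mod a 31 = a % 31 :=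
  PySem.Int.mod_eq_emod_of_pos (by norm_num)

-- every k strictly between one visited k and the next k chosen by A's analytic skip contributes
-- nothing: its residue is r + 12250492*j, at least SKIP1 = 12250492 > RMAX = 2031616
lemma pvG_skipped (t second x k j : Int) (h1 : 1 ≤ j)
    (h2 : j < (3698103769 - (x + 12250492 * k) % 3698103769 + 12250491) / 12250492) :
    pvG t second x (k + j) = [] := by
  have h3 : 12250492 * j ≤
      12250492 * ((3698103769 - (x + 12250492 * k) % 3698103769 + 12250491) / 12250492 - 1) :=
    Int.mul_le_mul_of_nonneg_left (by omega) (by norm_num)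
  have h4 : 12250492 * j ≤ 3698103769 - (x + 12250492 * k) % 3698103769 - 1 := by omega
  have h5 : (x + 12250492 * (k + j)) % 3698103769 =
      (x + 12250492 * k) % 3698103769 + 12250492 * j := by
    have he : x + 12250492 * (k + j) = (x + 12250492 * k) + 12250492 * j := by ring
    rw [he, ← Int.emod_add_emod]
    exact Int.emod_eq_of_lt (by omega) (by omega)
  unfold pvG
  rw [pvModM, if_neg]
  rintro ⟨-, hlt⟩
  omega

lemma pvG_gap (t second x : Int) (n : Nat) : ∀ (a c : Int),
    (∀ i : Int, a ≤ i → i < a + n → pvG t second x i = []) →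
    (PySem.List.pyRange a c 1).flatMap (pvG t second x)
      = (PySem.List.pyRange (a + (n : Int)) c 1).flatMap (pvG t second x) := by
  induction n with
  | zero => intro a c _; norm_num
  | succ m ih =>
    intro a c h
    by_cases hac : a < c
    · rw [PySem.List.pyRange_one_cons hac, List.flatMap_cons,
        h a le_rfl (by push_cast; omega), List.nil_append,
        ih (a + 1) c (fun i h1 h2 => h i (by omega) (by push_cast at h2 ⊢; omega))]
      congr 1
      push_cast
      ring_nf
    · rw [PySem.List.pyRange_one_eq_nil (by omega), PySem.List.pyRange_one_eq_nil (by omega)]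

-- A's skip-loop accumulates exactly the per-k contributions of every k in [k, kmax+1)
lemma pvLoopA_eq_flatMap (t second x kmax : Int) : ∀ (fuel : Nat) (k : Int) (res : List Int),
    (kmax + 1 - k).toNat ≤ fuel →
    pvLoopA t second x kmax k res fuel
      = res ++ (PySem.List.pyRange k (kmax + 1) 1).flatMap (pvG t second x) := by
  intro fuel
  induction fuel with
  | zero =>
    intro k res h
    rw [PySem.List.pyRange_one_eq_nil (by omega)]
    simp [pvLoopA]
  | succ f ih =>
    intro k res h
    by_cases hk : k ≤ kmax
    · rw [pvLoopA, if_pos hk]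
      simp only [pvModM, pvMod31]
      refine (ih _ _ ?_).trans ?_
      · omega
      · have hs1 : 1 ≤ (3698103769 - (x + 12250492 * k) % 3698103769 + 12250491) / 12250492 := by
          omega
        rw [PySem.List.pyRange_one_cons (show k < kmax + 1 by omega), List.flatMap_cons]
        have hgap := pvG_gap t second x
            ((3698103769 - (x + 12250492 * k) % 3698103769 + 12250491) / 12250492 - 1).toNat
            (k + 1) (kmax + 1)
            (fun i h1 h2 => by
              have hj := pvG_skipped t second x k (i - k) (by omega) (by omega)
              rw [show k + (i - k) = i from by ring] at hj
              exact hj)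
        rw [show (k + 1) + (((3698103769 - (x + 12250492 * k) % 3698103769 + 12250491) / 12250492
              - 1).toNat : Int)
            = k + (3698103769 - (x + 12250492 * k) % 3698103769 + 12250491) / 12250492
          from by omega] at hgap
        rw [hgap]
        have hgk : pvG t second x k
            = if ((x + 12250492 * k) % 3698103769) % 31 = 0
                 ∧ (x + 12250492 * k) % 3698103769 < 2031616 then
                [PySem.Int.bor second (PySem.Int.band
                  (PySem.Int.floordiv (t + k * 4294967296) 3698103769 * 38361 + 45350) 65535)]
              else [] := by
          rw [pvG]
          simp only [pvModM, pvMod31]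
        rw [hgk]
        split <;> simp
    · rw [pvLoopA, if_neg hk, PySem.List.pyRange_one_eq_nil (by omega)]
      simp

-- B's exhaustive scan accumulates the same contributions
lemma pvScanB_eq_flatMap (t second x : Int) (l : List Int) :
    l.foldl (fun res k =>
      let r := PySem.Int.mod (x + 12250492 * k) 3698103769
      if PySem.Int.mod r 31 = 0 ∧ r < 2031616 then
        res ++ [PySem.Int.bor second (PySem.Int.band
          (PySem.Int.floordiv (t + k * 4294967296) 3698103769 * 38361 + 45350) 65535)]
      else res) []
      = l.flatMap (pvG t second x) := by
  have hbody : (fun (res : List Int) (k : Int) =>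
      let r := PySem.Int.mod (x + 12250492 * k) 3698103769
      if PySem.Int.mod r 31 = 0 ∧ r < 2031616 then
        res ++ [PySem.Int.bor second (PySem.Int.band
          (PySem.Int.floordiv (t + k * 4294967296) 3698103769 * 38361 + 45350) 65535)]
      else res) = fun res k => res ++ pvG t second x k := by
    funext res k
    simp only [pvG]
    split <;> simp
  rw [hbody, PySem.List.foldl_append_eq_flatMap]
  simp

-- ===== VERDICT (by name: the statement is the Claim_ definition above) =====
theorem lcrng_recover_lower_16bits_pid_2_spec : Claim_equal_lcrng_recover_lower_16bits_pid_2 := by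
  intro pid _
  unfold Spec_lcrng_recover_lower_16bits_pid_2
  simp only [lcrng_recover_lower_16bits_pid_2, lcrng_recover_lower_16bits_pid_2_alt]
  rw [pvScanB_eq_flatMap]
  refine (pvLoopA_eq_flatMap _ _ _ _ _ _ _ ?_).trans ?_
  · omega
  · simp
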